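-- pv_equiv track=rewrite | github.com/DamonDaT/DataStructure | 03_递归/02_全排列.py | permutation_str
-- ===== SOURCE A (Python) =====
-- def permutation_str(ss):
--     # 递归终止条件
--     if len(ss) <= 1:
--         return ss
--     # 集合去重
--     res = set()
--     # 遍历字符串，每次固定一个元素
--     for i in range(len(ss)):
--         # 在固定一个字符串的前提下，其他元素进行全排列
--         for j in permutation_str(ss[:i] + ss[i+1:]):
--             # 添加元素并去重
--             res.add(ss[i] + j)
--     # 返回已排列的结果
--     return sorted(res)
-- ===== SOURCE B (Python) =====
-- def permutation_str(ss):
--     # Same base-case guard as A: a string of length <= 1 is returned as-is.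
--     if len(ss) <= 1:
--         return ss
--     # Iteratively build all permutations by inserting each character at every
--     # position of every partial permutation, then dedup and sort once.
--     perms = ['']
--     for c in ss:
--         perms = [p[:i] + c + p[i:] for p in perms for i in range(len(p) + 1)]
--     return sorted(set(perms))
-- ===== Notes on version B (the rewrite author's own statement) =====
-- stated objective: simpler
-- what changed: Replaces the fix-one-char recursion (which sorts and dedups at every recursion level) by a single iterative pass that inserts each character at every position of every partial permutation, followed by one dedup-and-sort at the end.
-- outside the precondition, e.g. on permutation_str('a'): A returns 'a', B returns 'a'; on permutation_str(''): A returns '', B returns ''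
import Mathlib
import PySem

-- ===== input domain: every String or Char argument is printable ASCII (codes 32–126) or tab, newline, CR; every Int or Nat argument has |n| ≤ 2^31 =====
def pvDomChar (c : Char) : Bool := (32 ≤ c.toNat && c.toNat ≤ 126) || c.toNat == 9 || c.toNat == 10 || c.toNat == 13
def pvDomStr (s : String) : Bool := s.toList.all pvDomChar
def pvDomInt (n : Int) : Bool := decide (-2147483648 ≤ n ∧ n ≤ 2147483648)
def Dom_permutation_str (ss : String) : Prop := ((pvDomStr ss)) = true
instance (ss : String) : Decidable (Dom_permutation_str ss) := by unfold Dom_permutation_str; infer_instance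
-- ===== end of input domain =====

-- B replaces A's fix-one-char recursion (sort+dedup at every level) by one iterative
-- insertion pass over the characters and a single final dedup-and-sort (objective: simpler).

-- ===== PORT A =====
-- A on the character list of ss; ss[:i] + ss[i+1:] with 0 ≤ i < len(ss) is take i ++ drop (i+1) (exact: i in range).
-- res = set() filled by the double loop is PySem.Set.ofList of the elements in loop order; sorted(res) with no key.
def permutation_strA (l : List Char) : List String :=
  if l.length ≤ 1 then [String.ofList l]
  else
    PySem.List.sorted
      (PySem.Set.ofList ((List.range l.length).attach.flatMap (fun ⟨i, hi⟩ =>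
        (permutation_strA (l.take i ++ l.drop (i + 1))).map
          (fun j => String.ofList (l[i]'(List.mem_range.mp hi) :: j.toList)))))
      (fun x => x) false
termination_by l.length
decreasing_by
  have := List.mem_range.mp hi
  simp [List.length_take, List.length_drop]
  omega

def permutation_str (ss : String) : List String := permutation_strA ss.toList

-- ===== PORT B =====
-- p[:i] + c + p[i:] with 0 ≤ i ≤ len(p) is take i ++ c :: drop i (exact: i in range(len(p)+1)).
def pvInsertions (c : Char) (p : List Char) : List (List Char) :=
  (List.range (p.length + 1)).map (fun i => p.take i ++ c :: p.drop i)

def permutation_str_alt (ss : String) : List String :=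
  if ss.toList.length ≤ 1 then [ss]  -- B returns the bare string here, like A (outside Pre_)
  else
    PySem.List.sorted
      (PySem.Set.ofList
        ((ss.toList.foldl (fun acc c => acc.flatMap (fun p => pvInsertions c p)) [[]]).map
          (fun p => String.ofList p)))
      (fun x => x) false

-- ===== PRECONDITION & SPEC =====
-- Pre_ excludes strings of length ≤ 1, on which the Python A (and B) returns the bare string
-- itself rather than a list — not a value of the declared return type List String.
def Pre_permutation_str (ss : String) : Prop := 2 ≤ ss.toList.length
instance (ss : String) : Decidable (Pre_permutation_str ss) := by unfold Pre_permutation_str; infer_instance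
def pvWitness_permutation_str : String := "ab"
def Spec_permutation_str (ss : String) (out : List String) : Prop := out = permutation_str_alt ss
instance (ss : String) (out : List String) : Decidable (Spec_permutation_str ss out) := by unfold Spec_permutation_str; infer_instance

-- ===== CLAIM (what is proved, stated in full; the proofs are below) =====
def Claim_equal_permutation_str : Prop := ∀ (ss : String), Dom_permutation_str ss → Pre_permutation_str ss → Spec_permutation_str ss (permutation_str ss)

-- ===== LEMMAS AND PROOFS =====

-- decompose a list at a position where c occurs
lemma pv_split_at_mem {c : Char} {p : List Char} (h : c ∈ p) :
    ∃ i, ∃ hi : i < p.length, p[i] = c ∧ p = p.take i ++ c :: p.drop (i + 1) := by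
  obtain ⟨i, hi, hc⟩ := List.getElem_of_mem h
  exact ⟨i, hi, hc, by rw [← hc, ← List.drop_eq_getElem_cons hi, List.take_append_drop]⟩

-- membership in B's insertion step, characterised as permutations
lemma pv_mem_insertions_perm {c : Char} {q p : List Char} (h : p ∈ pvInsertions c q) :
    p.Perm (c :: q) := by
  simp only [pvInsertions, List.mem_map, List.mem_range] at h
  obtain ⟨i, _, rfl⟩ := h
  have := List.perm_middle (l₁ := q.take i) (l₂ := q.drop i) (a := c)
  rwa [List.take_append_drop] at this

lemma pv_perm_exists_insertions {c : Char} {p l : List Char} (h : p.Perm (c :: l)) :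
    ∃ q, q.Perm l ∧ p ∈ pvInsertions c q := by
  have hc : c ∈ p := h.mem_iff.mpr (List.mem_cons_self ..)
  obtain ⟨i, hi, hpi, hsplit⟩ := pv_split_at_mem hc
  refine ⟨p.take i ++ p.drop (i + 1), ?_, ?_⟩
  · have h2 := (List.perm_middle (l₁ := p.take i) (l₂ := p.drop (i + 1)) (a := c)).symm
    rw [← hsplit] at h2
    exact (h2.trans h).cons_inv
  · simp only [pvInsertions, List.mem_map, List.mem_range]
    refine ⟨i, by simp [List.length_append, List.length_take, List.length_drop]; omega, ?_⟩
    have ht : (p.take i ++ p.drop (i + 1)).take i = p.take i := by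
      rw [List.take_append_of_le_length (by simp; omega), List.take_take]
      simp
    have hd : (p.take i ++ p.drop (i + 1)).drop i = p.drop (i + 1) := by
      rw [List.drop_append_of_le_length (by simp; omega)]
      simp [List.drop_eq_nil_of_le]
    rw [ht, hd, ← hsplit]

-- membership in B's iteratively built permutation list = being a permutation of l
lemma pv_mem_permsB (l : List Char) (p : List Char) :
    p ∈ l.foldl (fun acc c => acc.flatMap (fun q => pvInsertions c q)) [[]] ↔ p.Perm l := by
  induction l using List.reverseRecOn generalizing p with
  | nil => simp [List.perm_nil]
  | append_singleton l c ih =>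
    rw [List.foldl_append]
    simp only [List.foldl_cons, List.foldl_nil, List.mem_flatMap]
    constructor
    · rintro ⟨q, hq, hins⟩
      have h1 := (pv_mem_insertions_perm hins).trans (((ih q).mp hq).cons c)
      have hcl : (c :: l).Perm (l ++ [c]) := by
        simpa using (List.perm_middle (l₁ := l) (l₂ := ([] : List Char)) (a := c)).symm
      exact h1.trans hcl
    · intro hp
      have hp' : p.Perm (c :: l) := hp.trans (by simp)
      obtain ⟨q, hql, hins⟩ := pv_perm_exists_insertions hp'
      exact ⟨q, (ih q).mpr hql, hins⟩

-- membership in A's result = the string of a permutation of l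
lemma pv_memA : ∀ n (l : List Char), l.length = n → ∀ s : String,
    (s ∈ permutation_strA l ↔ ∃ p : List Char, p.Perm l ∧ s = String.ofList p) := by
  intro n
  induction n using Nat.strong_induction_on with
  | _ n ih =>
    intro l hl s
    by_cases h : l.length ≤ 1
    · rw [permutation_strA, if_pos h]
      match l, h with
      | [], _ => simp [List.perm_nil]
      | [c], _ => simp [List.perm_singleton]
    · rw [permutation_strA, if_neg h]
      rw [PySem.List.mem_sorted, PySem.Set.mem_ofList]
      simp only [List.mem_flatMap, List.mem_attach, List.mem_map, true_and]
      constructor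
      · rintro ⟨⟨i, hi⟩, j, hj, rfl⟩
        have hi' := List.mem_range.mp hi
        have hsub : (l.take i ++ l.drop (i + 1)).length = l.length - 1 := by
          simp [List.length_take, List.length_drop]; omega
        obtain ⟨p, hp, rfl⟩ :=
          (ih (l.length - 1) (by omega) _ hsub j).mp hj
        refine ⟨l[i] :: p, ?_, by simp⟩
        have h1 : (l[i] :: p).Perm (l.take i ++ l[i] :: l.drop (i + 1)) :=
          (hp.cons l[i]).trans List.perm_middle.symm
        rwa [← List.drop_eq_getElem_cons hi', List.take_append_drop] at h1
      · rintro ⟨p, hp, rfl⟩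
        match p, hp with
        | [], hp => exact absurd hp.length_eq (by simp; omega)
        | c :: p, hp =>
          have hc : c ∈ l := hp.mem_iff.mp (List.mem_cons_self ..)
          obtain ⟨i, hi, rfl⟩ := List.mem_iff_getElem.mp hc
          have hsub : (l.take i ++ l.drop (i + 1)).length = l.length - 1 := by
            simp [List.length_take, List.length_drop]; omega
          refine ⟨⟨i, List.mem_range.mpr hi⟩, String.ofList p, ?_, by simp⟩
          refine (ih (l.length - 1) (by omega) _ hsub _).mpr ⟨p, ?_, rfl⟩
          have h2 : l.Perm (l[i] :: (l.take i ++ l.drop (i + 1))) := by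
            have := List.perm_middle (l₁ := l.take i) (l₂ := l.drop (i + 1)) (a := l[i])
            rwa [← List.drop_eq_getElem_cons hi, List.take_append_drop] at this
          exact (hp.trans h2).cons_inv

-- ===== VERDICT (by name: the statement is the Claim_ definition above) =====
theorem permutation_str_spec : Claim_equal_permutation_str := by
  intro ss _ hpre
  unfold Spec_permutation_str permutation_str permutation_str_alt
  unfold Pre_permutation_str at hpre
  rw [if_neg (by omega)]
  rw [permutation_strA, if_neg (by omega)]
  set l := ss.toList with hls
  refine (PySem.List.sorted_eq_of_perm_of_pairwise_lt _ _ (fun x => x) ?_ ?_).symm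
  · -- the already-sorted A-side list is a permutation of B-side's deduped input
    have hApw : (PySem.List.sorted
        (PySem.Set.ofList ((List.range l.length).attach.flatMap (fun ⟨i, hi⟩ =>
          (permutation_strA (l.take i ++ l.drop (i + 1))).map
            (fun j => String.ofList (l[i]'(List.mem_range.mp hi) :: j.toList)))))
        (fun x => x) false).Pairwise (· < ·) := PySem.List.sorted_ofList_pairwise_lt _
    refine (List.perm_ext_iff_of_nodup (hApw.imp ne_of_lt) (PySem.Set.nodup_ofList _)).mpr ?_
    intro s
    have hA : s ∈ permutation_strA l ↔ ∃ p : List Char, p.Perm l ∧ s = String.ofList p :=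
      pv_memA l.length l rfl s
    rw [permutation_strA, if_neg (by omega)] at hA
    rw [hA, PySem.Set.mem_ofList, List.mem_map]
    constructor
    · rintro ⟨p, hp, rfl⟩
      exact ⟨p, (pv_mem_permsB l p).mpr hp, rfl⟩
    · rintro ⟨p, hp, rfl⟩
      exact ⟨p, (pv_mem_permsB l p).mp hp, rfl⟩
  · exact PySem.List.sorted_ofList_pairwise_lt _
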